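-- pv_equiv track=rewrite | github.com/kuzuri137/digital-id-auth | common.py | most_occured
-- ===== SOURCE A (Python) =====
-- def most_occured(li, name, occ):
--     corrected = []
--     for k in li:
--         if name == "first_name" or name == "last_name":  # if ocr is a first name or last name then, we do not require number
--             k = ''.join(e for e in k if e.isalnum())
--         if len(k) > 0:
--             corrected.append(k)
--     unique = []
--     count = []
--     for str in corrected:
--         if str in unique:
--             inde = unique.index(str)
--             count[inde] = count[inde] + 1
--         else:
--             unique.append(str)
--             count.append(1)
--     final = []
--     for h, j in enumerate(count):
--         if j >= occ:  # if occurance is greater than the threshhold then occurance is the required result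
--             final.append(unique[h])
--     return final
-- ===== SOURCE B (Python) =====
-- def most_occured(li, name, occ):
--     corrected = []
--     for k in li:
--         if name == "first_name" or name == "last_name":  # same cleaning as the task requires
--             k = ''.join(e for e in k if e.isalnum())
--         if len(k) > 0:
--             corrected.append(k)
--     # keep u at its first occurrence only, checking its total frequency by a direct scan:
--     return [u for i, u in enumerate(corrected)
--             if corrected.index(u) == i and corrected.count(u) >= occ]
-- ===== Notes on version B (the rewrite author's own statement) =====
-- stated objective: alternative
-- what changed: A counts incrementally in parallel unique/count arrays during one pass and then thresholds by index; B maintains no counting state at all: it keeps each cleaned element only at its first occurrence (index(u) == i) and decides membership by an on-demand count(u) scan of the cleaned list.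
import Mathlib
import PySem

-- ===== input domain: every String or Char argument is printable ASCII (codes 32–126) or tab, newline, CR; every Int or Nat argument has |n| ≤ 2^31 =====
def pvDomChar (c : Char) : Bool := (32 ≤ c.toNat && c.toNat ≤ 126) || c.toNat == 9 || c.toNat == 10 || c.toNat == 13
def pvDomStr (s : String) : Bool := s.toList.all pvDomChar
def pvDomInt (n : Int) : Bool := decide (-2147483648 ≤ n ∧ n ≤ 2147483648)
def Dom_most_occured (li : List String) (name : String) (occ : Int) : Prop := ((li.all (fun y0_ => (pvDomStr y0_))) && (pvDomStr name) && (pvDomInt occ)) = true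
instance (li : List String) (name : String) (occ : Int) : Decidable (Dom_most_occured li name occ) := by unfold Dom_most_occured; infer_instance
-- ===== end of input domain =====

-- B replaces A's incremental parallel-array counting with a first-occurrence comprehension that re-scans the list per distinct element (no counting structure at all); objective: alternative algorithm.


-- ===== PORT A =====
def most_occured (li : List String) (name : String) (occ : Int) : List String :=
  let corrected := li.foldl (fun acc k =>
    let k := if name == "first_name" || name == "last_name"
             then String.mk (k.toList.filter PySem.Chars.isalnum) else k
    if PySem.Str.len k > 0 then acc ++ [k] else acc) []
  let uc := corrected.foldl (fun (s : List String × List Int) str =>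
    if s.1.contains str then
      let inde := (PySem.List.index? s.1 str).getD 0
      (s.1, s.2.set inde (s.2.getD inde 0 + 1))
    else (s.1 ++ [str], s.2 ++ [1])) ([], [])
  (PySem.List.enumerate uc.2).foldl (fun final hj =>
    if hj.2 ≥ occ then final ++ [PySem.List.pyGetD uc.1 hj.1 ""] else final) []

-- ===== PORT B =====
def most_occured_alt (li : List String) (name : String) (occ : Int) : List String :=
  let corrected := li.foldl (fun acc k =>
    let k := if name == "first_name" || name == "last_name"
             then String.mk (k.toList.filter PySem.Chars.isalnum) else k
    if PySem.Str.len k > 0 then acc ++ [k] else acc) []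
  ((PySem.List.enumerate corrected).filter (fun p =>
      ((PySem.List.index? corrected p.2).map Int.ofNat == some p.1) &&
      decide (PySem.List.count corrected p.2 ≥ occ))).map Prod.snd

-- ===== PRECONDITION & SPEC =====
def Spec_most_occured (li : List String) (name : String) (occ : Int) (out : List String) : Prop := out = most_occured_alt li name occ
instance (li : List String) (name : String) (occ : Int) (out : List String) : Decidable (Spec_most_occured li name occ out) := by unfold Spec_most_occured; infer_instance

-- ===== CLAIM (what is proved, stated in full; the proofs are below) =====
def Claim_equal_most_occured : Prop := ∀ (li : List String) (name : String) (occ : Int), Dom_most_occured li name occ → Spec_most_occured li name occ (most_occured li name occ)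

-- ===== LEMMAS AND PROOFS =====

-- A's cleaning/appending loop (shared by both ports) produces a map-then-filter list.
theorem correctedA_eq (li : List String) (name : String) :
    li.foldl (fun acc k =>
      let k := if name == "first_name" || name == "last_name"
               then String.mk (k.toList.filter PySem.Chars.isalnum) else k
      if PySem.Str.len k > 0 then acc ++ [k] else acc) []
    = ((if name == "first_name" || name == "last_name"
        then li.map (fun k => String.mk (k.toList.filter PySem.Chars.isalnum)) else li).filter
        (fun k => PySem.Str.len k > 0)) := by
  by_cases hk : (name == "first_name" || name == "last_name") = true
  · simp only [hk, if_true]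
    rw [List.filter_map]
    have := PySem.List.foldl_append_if
      (fun k => PySem.Str.len (String.mk (k.toList.filter PySem.Chars.isalnum)) > 0)
      (fun k => String.mk (k.toList.filter PySem.Chars.isalnum)) li ([] : List String)
    simpa [Function.comp] using this
  · simp only [hk]
    simpa using PySem.List.foldl_append_if_eq_filter (fun k => PySem.Str.len k > 0) li ([] : List String)

-- A's unique/count loop computes (distinct-in-order, counts of each distinct element).
theorem loopA_eq (c : List String) :
    c.foldl (fun (s : List String × List Int) str =>
      if s.1.contains str then
        let inde := (PySem.List.index? s.1 str).getD 0
        (s.1, s.2.set inde (s.2.getD inde 0 + 1))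
      else (s.1 ++ [str], s.2 ++ [1])) ([], [])
    = (PySem.Set.ofList c, (PySem.Set.ofList c).map (fun u => ((c.count u : Nat) : Int))) := by
  induction c using List.reverseRecOn with
  | nil => simp [PySem.Set.ofList]
  | append_singleton ys s ih =>
    rw [List.foldl_append, ih, List.foldl_cons, List.foldl_nil, PySem.Set.ofList_append_singleton]
    dsimp only
    have hnd : (PySem.Set.ofList ys).Nodup := PySem.Set.nodup_ofList ys
    have hmem : ∀ x : String, x ∈ PySem.Set.ofList ys ↔ x ∈ ys :=
      fun x => PySem.Set.mem_ofList ys x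
    generalize hUdef : PySem.Set.ofList ys = U at hnd hmem ⊢
    have hcnt : ∀ u : String, (((ys ++ [s]).count u : Nat) : Int)
        = ((ys.count u : Nat) : Int) + (if u = s then 1 else 0) := by
      intro u
      have h1 : List.count u [s] = if u = s then 1 else 0 := by
        by_cases h : u = s
        · simp [h]
        · simp [List.count_nil, h, Ne.symm h]
      rw [List.count_append, h1]
      by_cases h : u = s <;> simp [h]
    by_cases hm : s ∈ U
    · have hcont : List.contains U s = true := by simpa using hm
      obtain ⟨i, hi⟩ := Option.isSome_iff_exists.mp ((PySem.List.index?_isSome_iff U s).mpr hm)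
      obtain ⟨hk, hUi, -⟩ := PySem.List.getElem_of_index?_eq_some hi
      have hadd : PySem.Set.add U s = U := by simp [PySem.Set.add, hm]
      rw [if_pos hcont]
      simp only [hi, Option.getD_some, hadd]
      refine Prod.ext rfl ?_
      have hget : (U.map (fun u => ((ys.count u : Nat) : Int))).getD i 0
          = ((ys.count U[i] : Nat) : Int) := by
        rw [List.getD_eq_getElem _ _ (by simpa using hk)]
        simp
      rw [hget]
      apply List.ext_getElem
      · simp
      · intro j hj hj'
        have hjU : j < U.length := by simpa using hj'
        rw [List.getElem_set]
        by_cases hij : i = j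
        · subst hij
          simp [hUi]
        · have hne : U[j] ≠ s := by
            intro he
            exact hij (hnd.getElem_inj_iff.mp (by rw [hUi, he]))
          have h0 : List.count U[j] [s] = 0 := by
            simp [List.count_nil, Ne.symm hne]
          simp [hij, h0, List.count_append]
    · have hms : s ∉ ys := fun h => hm ((hmem s).mpr h)
      have hadd : PySem.Set.add U s = U ++ [s] := by simp [PySem.Set.add, hm]
      have h2 : List.map (fun u => ((List.count u (ys ++ [s]) : Nat) : Int)) (U ++ [s])
          = List.map (fun u => ((List.count u ys : Nat) : Int)) U ++ [1] := by
        rw [List.map_append]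
        congr 1
        · apply List.map_congr_left
          intro u hu
          have hus : u ≠ s := fun he => hm (he ▸ hu)
          have h0 : List.count u [s] = 0 := by simp [List.count_nil, Ne.symm hus]
          simp [List.count_append, h0]
        · simp [List.count_append, List.count_eq_zero_of_not_mem hms]
      rw [if_neg (by simpa using hm), hadd, h2]

-- A's enumerate/threshold loop over (U, U.map f) is a filter over U.
theorem finalLoop_eq (U : List String) (f : String → Int) (occ : Int) :
    (PySem.List.enumerate (U.map f)).foldl (fun final hj =>
      if hj.2 ≥ occ then final ++ [PySem.List.pyGetD U hj.1 ""] else final) []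
    = U.filter (fun u => decide (f u ≥ occ)) := by
  induction U using List.reverseRecOn with
  | nil => simp
  | append_singleton ys s ih =>
    rw [List.map_append, PySem.List.enumerate_append, List.foldl_append]
    have hfirst : (PySem.List.enumerate (ys.map f)).foldl (fun final hj =>
        if hj.2 ≥ occ then final ++ [PySem.List.pyGetD (ys ++ [s]) hj.1 ""] else final) []
        = (PySem.List.enumerate (ys.map f)).foldl (fun final hj =>
        if hj.2 ≥ occ then final ++ [PySem.List.pyGetD ys hj.1 ""] else final) [] := by
      apply PySem.List.foldl_congr_mem
      intro acc x hx
      obtain ⟨k, hk, hxk⟩ := (PySem.List.mem_enumerate_iff (ys.map f) 0 x).mp hx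
      have hky : k < ys.length := by simpa using hk
      have hx1 : x.1 = (k : Int) := by rw [hxk]; simp
      have : PySem.List.pyGetD (ys ++ [s]) x.1 "" = PySem.List.pyGetD ys x.1 "" := by
        rw [hx1, PySem.List.pyGetD_of_nonneg _ _ (by positivity),
            PySem.List.pyGetD_of_nonneg _ _ (by positivity)]
        simp only [Int.toNat_natCast]
        rw [List.getD_eq_getElem _ _ (by simp; omega), List.getD_eq_getElem _ _ hky]
        exact List.getElem_append_left hky
      rw [this]
    rw [hfirst, ih]
    simp only [List.map_cons, List.map_nil]
    have hsing : PySem.List.enumerate ([f s]) ((0 : Int) + (ys.map f).length)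
        = [(((ys.length : Nat) : Int), f s)] := by
      simp [PySem.List.enumerate_cons, PySem.List.enumerate_nil]
    rw [hsing]
    have hgs : PySem.List.pyGetD (ys ++ [s]) ((ys.length : Nat) : Int) "" = s := by
      rw [PySem.List.pyGetD_of_nonneg _ _ (by positivity)]
      simp only [Int.toNat_natCast]
      rw [List.getD_eq_getElem _ _ (by simp)]
      simp
    rw [List.filter_append]
    by_cases hocc : f s ≥ occ <;> simp [List.foldl, hocc, hgs]

-- B's first-occurrence test over the enumeration selects exactly the order-preserving distinct list.
theorem firstOcc_eq (c : List String) :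
    ((PySem.List.enumerate c).filter (fun p =>
        (PySem.List.index? c p.2).map Int.ofNat == some p.1)).map Prod.snd
    = PySem.Set.ofList c := by
  induction c using List.reverseRecOn with
  | nil => simp [PySem.Set.ofList, PySem.List.enumerate_nil]
  | append_singleton ys s ih =>
    rw [PySem.List.enumerate_append, List.filter_append, List.map_append,
        PySem.Set.ofList_append_singleton]
    have hfirst : (PySem.List.enumerate ys).filter (fun p =>
        (PySem.List.index? (ys ++ [s]) p.2).map Int.ofNat == some p.1)
        = (PySem.List.enumerate ys).filter (fun p =>
        (PySem.List.index? ys p.2).map Int.ofNat == some p.1) := by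
      apply List.filter_congr
      intro p hp
      obtain ⟨k, hk, hpk⟩ := (PySem.List.mem_enumerate_iff ys 0 p).mp hp
      have hmem : p.2 ∈ ys := by rw [hpk]; exact List.getElem_mem hk
      rw [PySem.List.index?_append_of_mem [s] hmem]
    rw [hfirst, ih]
    by_cases hm : s ∈ ys
    · have hadd : PySem.Set.add (PySem.Set.ofList ys) s = PySem.Set.ofList ys := by
        simp [PySem.Set.add, (PySem.Set.mem_ofList ys s).mpr hm]
      obtain ⟨j, hj⟩ := Option.isSome_iff_exists.mp ((PySem.List.index?_isSome_iff ys s).mpr hm)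
      obtain ⟨hjlt, -, -⟩ := PySem.List.getElem_of_index?_eq_some hj
      have hidx : PySem.List.index? (ys ++ [s]) s = some j :=
        (PySem.List.index?_append_of_mem [s] hm).trans hj
      have hcond : ((PySem.List.index? (ys ++ [s]) s).map Int.ofNat
          == some ((0 : Int) + (ys.length : Int))) = false := by
        rw [hidx]
        simp only [Option.map_some]
        rw [beq_eq_false_iff_ne]
        intro h
        rw [Option.some_inj] at h
        simp only [Int.ofNat_eq_natCast] at h
        omega
      simp only [PySem.List.enumerate_cons, PySem.List.enumerate_nil,
        List.filter_cons, List.filter_nil]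
      rw [hcond]
      simp [hadd]
    · have hadd : PySem.Set.add (PySem.Set.ofList ys) s = PySem.Set.ofList ys ++ [s] := by
        simp [PySem.Set.add, PySem.Set.mem_ofList, hm]
      have hidx : PySem.List.index? (ys ++ [s]) s = some ys.length :=
        PySem.List.index?_append_singleton_self _ _ hm
      have hcond : ((PySem.List.index? (ys ++ [s]) s).map Int.ofNat
          == some ((0 : Int) + (ys.length : Int))) = true := by
        rw [hidx]
        simp
      simp only [PySem.List.enumerate_cons, PySem.List.enumerate_nil,
        List.filter_cons, List.filter_nil]
      rw [hcond]
      simp [hadd]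

-- Filtering a conjunction whose second test reads only the element commutes with dropping indices.
theorem filter_conj_map (l : List (Int × String)) (q1 : Int × String → Bool) (q2 : String → Bool) :
    (l.filter (fun p => q1 p && q2 p.2)).map Prod.snd
    = ((l.filter q1).map Prod.snd).filter q2 := by
  induction l with
  | nil => rfl
  | cons p t ih => by_cases h1 : q1 p <;> by_cases h2 : q2 p.2 <;> simp [h1, h2, ih]

-- ===== VERDICT (by name: the statement is the Claim_ definition above) =====
theorem most_occured_spec : Claim_equal_most_occured := by
  intro li name occ _
  unfold Spec_most_occured most_occured most_occured_alt
  simp only []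
  rw [correctedA_eq, loopA_eq]
  set c := ((if name == "first_name" || name == "last_name"
      then li.map (fun k => String.mk (k.toList.filter PySem.Chars.isalnum)) else li).filter
      (fun k => PySem.Str.len k > 0)) with hc
  rw [finalLoop_eq (PySem.Set.ofList c) (fun u => ((c.count u : Nat) : Int)) occ]
  rw [filter_conj_map (PySem.List.enumerate c)
      (fun p => (PySem.List.index? c p.2).map Int.ofNat == some p.1)
      (fun u => decide (PySem.List.count c u ≥ occ))]
  rw [firstOcc_eq c]
  apply List.filter_congr
  intro u _
  simp [PySem.List.count_eq]
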